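-- pv_equiv track=rewrite | github.com/pypi-data/pypi-mirror-90 | packages/tox/tox-4.0.0a2.tar.gz/tox-4.0.0a2/src/tox/config/loader/ini/replace.py | _find_replace_part
-- ===== SOURCE A (Python) =====
-- from typing import TYPE_CHECKING, Iterator, List, Optional, Sequence, Tuple, Union
--
-- def _find_replace_part(value: str, start: int, end: int) -> Tuple[int, int, bool]:
--     match = False
--     while end != -1:
--         end = value.find("}", end)
--         if end == -1:
--             continue
--         if end >= 1 and value[end - 1] == "\\":  # ignore escaped
--             end += 1
--             continue
--         before = end
--         while True:
--             start = value.rfind("{", 0, before)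
--             if start >= 1 and value[start - 1] == "\\":  # ignore escaped
--                 before = start - 1
--                 continue
--             match = start != -1
--             break
--         break  # pragma: no cover # for some odd reason this line is not reported by coverage, though is needed
--     return start, end, match
-- ===== SOURCE B (Python) =====
-- def _find_replace_part(value, start, end):
--     if end == -1:
--         return start, -1, False
--     n = len(value)
--     pos = end if end >= 0 else max(0, end + n)
--     last_open = -1
--     prev = ""
--     for i, c in enumerate(value):
--         if prev != "\\":
--             if c == "{":
--                 last_open = i
--             elif c == "}" and i >= pos:
--                 return last_open, i, last_open != -1
--         prev = c
--     return start, -1, False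
-- ===== Notes on version B (the rewrite author's own statement) =====
-- stated objective: alternative
-- what changed: Replaced A's repeated str.find/str.rfind passes (an outer loop re-searching for '}' past escaped ones and an inner backward rfind loop skipping escaped '{') with one left-to-right scan that tracks the previous character and the index of the last unescaped '{' and stops at the first unescaped '}' at or beyond the clamped end position.
import Mathlib
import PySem

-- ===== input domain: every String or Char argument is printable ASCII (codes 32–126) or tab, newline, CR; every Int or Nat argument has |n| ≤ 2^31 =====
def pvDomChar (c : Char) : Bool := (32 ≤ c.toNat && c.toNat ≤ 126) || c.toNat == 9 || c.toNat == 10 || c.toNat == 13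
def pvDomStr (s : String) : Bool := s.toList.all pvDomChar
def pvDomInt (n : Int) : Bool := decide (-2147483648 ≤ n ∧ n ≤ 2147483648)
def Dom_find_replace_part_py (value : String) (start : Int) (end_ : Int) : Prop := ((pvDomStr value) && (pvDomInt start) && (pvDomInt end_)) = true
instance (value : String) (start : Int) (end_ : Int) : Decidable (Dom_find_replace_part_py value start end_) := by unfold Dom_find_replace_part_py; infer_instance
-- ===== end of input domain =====

-- B is a single left-to-right scan (tracking the last unescaped '{' and the previous character)
-- replacing A's repeated find/rfind passes with escape-skip loops; objective: alternative (same cost).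

-- ===== PORT A =====
-- inner `while True` of A: rfind '{' before `before`, stepping left past escaped ones (fuel makes the loop total; it is always sufficient)
def pvAInner (value : String) (fuel : Nat) (before : Int) : Int :=
  match fuel with
  | 0 => -1
  | fuel + 1 =>
    let s := PySem.Str.rfindFrom value "{" 0 (some before)
    if 1 ≤ s ∧ PySem.Str.pyGet? value (s - 1) = some '\\' then pvAInner value fuel (s - 1)
    else s

-- outer `while end != -1` of A; the `continue` after `end = value.find(...)` returned -1
-- immediately fails the loop condition, i.e. returns (start, -1, False)
def pvAOuter (value : String) (start : Int) (fuel : Nat) (end_ : Int) : Int × Int × Bool :=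
  match fuel with
  | 0 => (start, end_, false)
  | fuel + 1 =>
    if end_ = -1 then (start, end_, false)
    else
      let e := PySem.Str.findFrom value "}" end_
      if e = -1 then (start, e, false)
      else if 1 ≤ e ∧ PySem.Str.pyGet? value (e - 1) = some '\\' then
        pvAOuter value start fuel (e + 1)
      else
        let s := pvAInner value (value.length + 2) e
        (s, e, decide (s ≠ -1))

def find_replace_part_py (value : String) (start : Int) (end_ : Int) : Int × Int × Bool :=
  pvAOuter value start (value.length + 2) end_

-- ===== PORT B =====
-- B's forward scan: i = index of c, lo = last unescaped '{' so far, prev = previous character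
def pvBGo (pos : Int) : List Char → Nat → Int → Option Char → Option (Int × Int × Bool)
  | [], _, _, _ => none
  | c :: rest, i, lo, prev =>
    if prev ≠ some '\\' ∧ c = '{' then pvBGo pos rest (i + 1) (i : Int) (some c)
    else if prev ≠ some '\\' ∧ c = '}' ∧ pos ≤ (i : Int) then some (lo, (i : Int), decide (lo ≠ -1))
    else pvBGo pos rest (i + 1) lo (some c)

def find_replace_part_py_alt (value : String) (start : Int) (end_ : Int) : Int × Int × Bool :=
  if end_ = -1 then (start, -1, false)
  else
    let n : Int := value.length
    let pos : Int := if 0 ≤ end_ then end_ else max 0 (end_ + n)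
    match pvBGo pos value.toList 0 (-1) none with
    | some r => r
    | none => (start, -1, false)

-- ===== PRECONDITION & SPEC =====
def Spec_find_replace_part_py (value : String) (start : Int) (end_ : Int) (out : Int × Int × Bool) : Prop := out = find_replace_part_py_alt value start end_
instance (value : String) (start : Int) (end_ : Int) (out : Int × Int × Bool) : Decidable (Spec_find_replace_part_py value start end_ out) := by unfold Spec_find_replace_part_py; infer_instance

-- ===== CLAIM (what is proved, stated in full; the proofs are below) =====
def Claim_equal_find_replace_part_py : Prop := ∀ (value : String) (start : Int) (end_ : Int), Dom_find_replace_part_py value start end_ → Spec_find_replace_part_py value start end_ (find_replace_part_py value start end_)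

-- ===== LEMMAS AND PROOFS =====

-- escaped position: i ≥ 1 and the previous character is a backslash
def pvEsc (cs : List Char) : Nat → Bool
  | 0 => false
  | j + 1 => cs[j]? == some '\\'

-- last unescaped '{' at an index < b, as an Int (-1 if none)
def pvLo (cs : List Char) : Nat → Int
  | 0 => -1
  | j + 1 => if cs[j]? = some '{' ∧ pvEsc cs j = false then (j : Int) else pvLo cs j

-- last '{' (escaped or not) at an index < b
def pvRo (cs : List Char) : Nat → Int
  | 0 => -1
  | j + 1 => if cs[j]? = some '{' then (j : Int) else pvRo cs j

-- index of the first '}' in l (offset form)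
def pvFi : List Char → Option Nat
  | [] => none
  | c :: t => if c = '}' then some 0 else (pvFi t).map (· + 1)

-- first unescaped '}' at an index ≥ pos
def pvFc (cs : List Char) (pos : Nat) : Option Nat :=
  if h : pos < cs.length then
    (if cs[pos]? = some '}' ∧ pvEsc cs pos = false then some pos else pvFc cs (pos + 1))
  else none
termination_by cs.length - pos

-- Python slice clamp of the find() start argument
def pvClamp (t : Int) (n : Nat) : Nat :=
  (if t < 0 then (if t + n < 0 then 0 else t + n) else t).toNat

-- the common canonical result both ports compute
def pvCanon (cs : List Char) (start : Int) (pos : Nat) : Int × Int × Bool :=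
  match pvFc cs pos with
  | none => (start, -1, false)
  | some e => (pvLo cs e, (e : Int), decide (pvLo cs e ≠ -1))

theorem pvRo_lt (cs : List Char) (b : Nat) : pvRo cs b < b ∧ -1 ≤ pvRo cs b := by
  induction b with
  | zero => simp [pvRo]
  | succ j ih => simp only [pvRo]; split <;> omega

theorem single_isPrefixOf (c : Char) (m : List Char) :
    [c].isPrefixOf m = (m.head? == some c) := by
  cases m with
  | nil => simp [List.isPrefixOf]
  | cons d t => simp [List.isPrefixOf, eq_comm]

-- rfind.go from j finds the last index ≤ j holding '{' ; phrased with pvRo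
theorem rfind_go_ro (l : List Char) (j : Nat) :
    PySem.Chars.rfind.go l ['{'] j = pvRo l (j + 1) := by
  induction j with
  | zero =>
    simp [PySem.Chars.rfind.go, pvRo, single_isPrefixOf, ← List.head?_eq_getElem?]
  | succ k ih =>
    simp only [PySem.Chars.rfind.go, single_isPrefixOf, List.head?_drop, pvRo]
    rw [ih]
    rcases h : l[k + 1]? with _ | c
    · simp [pvRo]
    · by_cases hc : c = '{' <;> simp [hc, pvRo]

theorem pvRo_take (cs : List Char) (b j : Nat) (h : j ≤ b) :
    pvRo (cs.take b) j = pvRo cs j := by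
  induction j with
  | zero => simp [pvRo]
  | succ k ih =>
    simp only [pvRo, ih (by omega)]
    rw [List.getElem?_take_of_lt (by omega)]

-- rfindFrom with start 0 and end b : last raw '{' below b
theorem rfindFrom_char (cs : List Char) (b : Int) (h0 : 0 ≤ b) (hn : b ≤ (cs.length : Int)) :
    PySem.Chars.rfindFrom cs ['{'] 0 (some b) = pvRo cs b.toNat := by
  unfold PySem.Chars.rfindFrom
  simp only [PySem.Chars.rfind]
  have he : (if (cs.length : Int) < b then (cs.length : Int) else if b < 0 then (if b + (cs.length : Int) < 0 then 0 else b + cs.length) else b) = b := by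
    rw [if_neg (by omega), if_neg (by omega)]
  rw [he]
  rw [if_neg (by omega : ¬ (0:Int) < 0), if_neg (by omega : ¬ b < (0:Int))]
  rw [rfind_go_ro]
  have hlen : (List.take b.toNat cs).length = b.toNat := by simp; omega
  simp only [Int.toNat_zero, List.drop_zero, hlen]
  have h1 : pvRo (List.take b.toNat cs) (b.toNat + 1) = pvRo (List.take b.toNat cs) b.toNat := by
    simp only [pvRo]
    rw [List.getElem?_eq_none (by omega)]
    simp
  rw [h1, pvRo_take cs b.toNat b.toNat le_rfl]
  split
  · omega
  · omega

-- the escape test of the ports equals pvEsc (for an in-range index)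
theorem esc_cond (cs : List Char) (k : Nat) :
    ((1 ≤ (k : Int) ∧ PySem.Chars.pyGet? cs ((k : Int) - 1) = some '\\')) ↔ pvEsc cs k = true := by
  cases k with
  | zero => simp [pvEsc]
  | succ j =>
    have h1 : ((j + 1 : Nat) : Int) - 1 = (j : Int) := by push_cast; omega
    simp [pvEsc, PySem.Chars.pyGet?, PySem.List.pyGet?_natCast]

-- skipping an escaped '{' does not change the last unescaped '{'
theorem pvLo_eq_ro_step (cs : List Char) (b : Nat) :
    pvLo cs b =
      (if 1 ≤ pvRo cs b ∧ cs[(pvRo cs b - 1).toNat]? = some '\\'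
        then pvLo cs (pvRo cs b - 1).toNat else pvRo cs b) := by
  induction b with
  | zero => simp [pvLo, pvRo]
  | succ j ih =>
    by_cases h : cs[j]? = some '{'
    · rw [show pvRo cs (j + 1) = (j : Int) from by simp [pvRo, h]]
      cases j with
      | zero => simp [pvLo, pvEsc, h]
      | succ i =>
        have ht : (((i + 1 : Nat) : Int) - 1).toNat = i := by omega
        rw [ht]
        by_cases he : cs[i]? = some '\\'
        · rw [if_pos ⟨by omega, he⟩]
          have h1 : pvLo cs (i + 1 + 1) = pvLo cs (i + 1) := by
            simp [pvLo, pvEsc, he]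
          have h2 : pvLo cs (i + 1) = pvLo cs i := by
            simp [pvLo, he]
          rw [h1, h2]
        · rw [if_neg (by simp [he])]
          simp [pvLo, pvEsc, h, he]
    · have hr : pvRo cs (j + 1) = pvRo cs j := by simp [pvRo, h]
      have hl : pvLo cs (j + 1) = pvLo cs j := by simp [pvLo, h]
      rw [hr, hl, ih]

-- A's inner loop computes the last unescaped '{' below `before`
theorem inner_eq (value : String) : ∀ (b : Nat), b ≤ value.toList.length →
    ∀ fuel, b < fuel → pvAInner value fuel (b : Int) = pvLo value.toList b := by
  intro b
  induction b using Nat.strong_induction_on with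
  | _ b ih =>
    intro hb fuel hf
    match fuel, hf with
    | f + 1, _ =>
      rw [pvAInner]
      simp only [PySem.Str.rfindFrom_eq, PySem.Str.pyGet?_eq]
      have htl : ("{" : String).toList = ['{'] := by decide
      rw [htl, rfindFrom_char _ _ (by omega) (by exact_mod_cast Nat.cast_le.mpr hb)]
      simp only [Int.toNat_natCast]
      have hro := pvRo_lt value.toList b
      by_cases hc : 1 ≤ pvRo value.toList b ∧
          PySem.Chars.pyGet? value.toList (pvRo value.toList b - 1) = some '\\'
      · rw [if_pos hc]
        have hcast : pvRo value.toList b - 1 = (((pvRo value.toList b - 1).toNat : Nat) : Int) := by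
          omega
        have hget : PySem.Chars.pyGet? value.toList (pvRo value.toList b - 1)
            = value.toList[(pvRo value.toList b - 1).toNat]? := by
          rw [hcast, PySem.Chars.pyGet?, PySem.List.pyGet?_natCast]
          simp
        rw [hcast, ih _ (by omega) (by omega) f (by omega)]
        rw [pvLo_eq_ro_step value.toList b, if_pos ⟨hc.1, by rw [← hget]; exact hc.2⟩]
      · rw [if_neg hc]
        rw [pvLo_eq_ro_step value.toList b]
        rw [if_neg (by
          intro h2
          apply hc
          refine ⟨h2.1, ?_⟩
          have hcast : pvRo value.toList b - 1 = (((pvRo value.toList b - 1).toNat : Nat) : Int) := by omega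
          rw [hcast, PySem.Chars.pyGet?, PySem.List.pyGet?_natCast]
          simpa using h2.2)]

theorem find_go_char (l : List Char) : ∀ (k : Nat),
    PySem.Chars.find.go ['}'] l k =
      (match pvFi l with
        | none => -1
        | some j => ((k + j : Nat) : Int)) := by
  induction l with
  | nil => intro k; simp [PySem.Chars.find.go, pvFi]
  | cons c t ih =>
    intro k
    rw [PySem.Chars.find.go]
    by_cases hc : c = '}'
    · simp [pvFi, hc, List.isPrefixOf]
    · have hp : (['}'].isPrefixOf (c :: t)) = false := by
        simp [List.isPrefixOf]
        exact fun h => absurd h.symm hc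
      rw [hp]
      simp only [Bool.false_eq_true, if_false, ih (k + 1), pvFi, if_neg hc]
      rcases pvFi t with _ | j
      · simp
      · simp only [Option.map_some]
        norm_cast
        omega

theorem findFrom_char (cs : List Char) (t : Int) :
    PySem.Chars.findFrom cs ['}'] t none =
      (match pvFi (cs.drop (pvClamp t cs.length)) with
        | none => -1
        | some j => ((pvClamp t cs.length + j : Nat) : Int)) := by
  unfold PySem.Chars.findFrom
  simp only [PySem.Chars.find]
  set st : Int := if t < 0 then (if t + (cs.length:Int) < 0 then 0 else t + cs.length) else t with hst
  have hst0 : 0 ≤ st := by rw [hst]; split <;> [skip; omega]; split <;> omega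
  have hstc : st.toNat = pvClamp t cs.length := by rw [pvClamp]
  by_cases hbig : (cs.length : Int) < st
  · rw [if_pos hbig]
    have : cs.drop st.toNat = [] := by
      apply List.drop_eq_nil_of_le; omega
    rw [hstc] at this
    rw [this]
    simp [pvFi]
  · rw [if_neg hbig]
    rw [show ((cs.length : Int)).toNat = cs.length from by omega, List.take_length]
    rw [find_go_char]
    rw [hstc]
    rcases h : pvFi (cs.drop (pvClamp t cs.length)) with _ | j <;> simp
    · omega

-- relation between the raw first '}' and the first unescaped '}'
theorem pvFc_of_fi (cs : List Char) : ∀ (pos : Nat),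
    (match pvFi (cs.drop pos) with
      | none => pvFc cs pos = none
      | some j => cs[pos + j]? = some '}' ∧
          pvFc cs pos = (if pvEsc cs (pos + j) then pvFc cs (pos + j + 1) else some (pos + j))) := by
  intro pos
  induction h : cs.length - pos using Nat.strong_induction_on generalizing pos with
  | _ d ih =>
  by_cases hp : pos < cs.length
  · have hdrop : cs.drop pos = cs[pos] :: cs.drop (pos + 1) := by
      rw [List.drop_eq_getElem_cons hp]
    rw [hdrop]
    by_cases hc : cs[pos] = '}'
    · simp only [pvFi, if_pos hc, Nat.add_zero]
      refine ⟨by simp [List.getElem?_eq_getElem hp, hc], ?_⟩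
      rw [pvFc, dif_pos hp]
      by_cases he : pvEsc cs pos = true
      · rw [if_neg (by simp [he]), if_pos he]
      · rw [if_pos ⟨by simp [List.getElem?_eq_getElem hp, hc], by simpa using he⟩,
          if_neg (by simpa using he)]
      -- note pos + 0 = pos handled by simp? check
    · simp only [pvFi, if_neg hc]
      have hrec := ih (cs.length - (pos + 1)) (by omega) (pos + 1) rfl
      have hfc : pvFc cs pos = pvFc cs (pos + 1) := by
        rw [pvFc, dif_pos hp, if_neg (by simp [List.getElem?_eq_getElem hp, hc])]
      rcases hfi : pvFi (cs.drop (pos + 1)) with _ | j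
      · rw [hfi] at hrec
        simpa [hfc] using hrec
      · rw [hfi] at hrec
        simp only [Option.map_some]
        have harith : pos + (j + 1) = (pos + 1) + j := by omega
        rw [harith, hfc]
        exact hrec
  · have : cs.drop pos = [] := List.drop_eq_nil_of_le (by omega)
    rw [this]
    simp only [pvFi]
    rw [pvFc, dif_neg hp]

-- A's outer loop from a Nat position computes the canonical result
theorem pvClamp_natCast (p : Nat) (n : Nat) : pvClamp (p : Nat) n = p := by
  unfold pvClamp
  rw [if_neg (by omega)]
  omega

theorem outer_eq (value : String) (start : Int) : ∀ (fuel : Nat) (pos : Nat),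
    value.toList.length ≤ fuel + pos →
    pvAOuter value start (fuel + 1) (pos : Int) = pvCanon value.toList start pos := by
  intro fuel
  induction fuel with
  | zero =>
    intro pos h
    rw [pvAOuter]
    rw [if_neg (by omega)]
    simp only [PySem.Str.findFrom_eq, show ("}" : String).toList = ['}'] from by decide]
    rw [findFrom_char, pvClamp_natCast]
    have hdrop : value.toList.drop pos = [] := List.drop_eq_nil_of_le (by omega)
    have hfi : pvFi (value.toList.drop pos) = none := by rw [hdrop]; rfl
    have hfc := pvFc_of_fi value.toList pos
    rw [hfi] at hfc ⊢
    simp only at hfc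
    rw [if_pos rfl, pvCanon, hfc]
  | succ f ih =>
    intro pos h
    rw [pvAOuter]
    rw [if_neg (by omega)]
    simp only [PySem.Str.findFrom_eq, show ("}" : String).toList = ['}'] from by decide]
    rw [findFrom_char, pvClamp_natCast]
    have hfc := pvFc_of_fi value.toList pos
    rcases hfi : pvFi (value.toList.drop pos) with _ | j
    · rw [hfi] at hfc
      simp only at hfc ⊢
      simp only [if_true]
      rw [pvCanon, hfc]
    · rw [hfi] at hfc
      simp only at hfc ⊢
      obtain ⟨hclose, hfcstep⟩ := hfc
      have hlt : pos + j < value.toList.length := by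
        by_contra hge
        rw [List.getElem?_eq_none (by omega)] at hclose
        simp at hclose
      rw [if_neg (by
        intro hbad
        have : ((pos + j : Nat) : Int) = -1 := hbad
        omega)]
      simp only [PySem.Str.pyGet?_eq]
      by_cases hesc : pvEsc value.toList (pos + j) = true
      · rw [if_pos ((esc_cond value.toList (pos + j)).mpr hesc)]
        have harith : ((pos + j : Nat) : Int) + 1 = ((pos + j + 1 : Nat) : Int) := by push_cast; omega
        rw [harith, ih (pos + j + 1) (by omega)]
        rw [pvCanon, pvCanon, hfcstep, if_pos hesc]
      · rw [if_neg (fun hc => hesc ((esc_cond value.toList (pos + j)).mp hc))]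
        have hinner : pvAInner value (value.length + 2) ((pos + j : Nat) : Int)
            = pvLo value.toList (pos + j) := by
          apply inner_eq value (pos + j) (by omega)
          have hvl : value.toList.length = value.length := String.length_toList
          omega
        simp only [hinner]
        rw [pvCanon, hfcstep, if_neg (by simpa using hesc)]

theorem a_canon (value : String) (start : Int) (end_ : Int) (h : end_ ≠ -1) :
    find_replace_part_py value start end_ =
      pvCanon value.toList start (pvClamp end_ value.toList.length) := by
  unfold find_replace_part_py
  have hvl : value.toList.length = value.length := String.length_toList
  rw [show value.length + 2 = (value.length + 1) + 1 from rfl, pvAOuter, if_neg h]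
  simp only [PySem.Str.findFrom_eq, show ("}" : String).toList = ['}'] from by decide]
  rw [findFrom_char]
  set p := pvClamp end_ value.toList.length with hp
  have hfc := pvFc_of_fi value.toList p
  rcases hfi : pvFi (value.toList.drop p) with _ | j
  · rw [hfi] at hfc
    simp only at hfc ⊢
    simp only [if_true]
    rw [pvCanon, hfc]
  · rw [hfi] at hfc
    simp only at hfc ⊢
    obtain ⟨hclose, hfcstep⟩ := hfc
    have hlt : p + j < value.toList.length := by
      by_contra hge
      rw [List.getElem?_eq_none (by omega)] at hclose
      simp at hclose
    rw [if_neg (by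
      intro hbad
      have : ((p + j : Nat) : Int) = -1 := hbad
      omega)]
    simp only [PySem.Str.pyGet?_eq]
    by_cases hesc : pvEsc value.toList (p + j) = true
    · rw [if_pos ((esc_cond value.toList (p + j)).mpr hesc)]
      have harith : ((p + j : Nat) : Int) + 1 = ((p + j + 1 : Nat) : Int) := by push_cast; omega
      rw [harith, outer_eq value start value.length (p + j + 1) (by omega)]
      rw [pvCanon, pvCanon, hfcstep, if_pos hesc]
    · rw [if_neg (fun hc => hesc ((esc_cond value.toList (p + j)).mp hc))]
      have hinner : pvAInner value (value.length + 2) ((p + j : Nat) : Int)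
          = pvLo value.toList (p + j) := by
        apply inner_eq value (p + j) (by omega)
        omega
      simp only [hinner]
      rw [pvCanon, hfcstep, if_neg (by simpa using hesc)]

def pvPrev (cs : List Char) : Nat → Option Char
  | 0 => none
  | j + 1 => cs[j]?

theorem pvPrev_esc (cs : List Char) (i : Nat) :
    (pvPrev cs i ≠ some '\\') ↔ pvEsc cs i = false := by
  cases i with
  | zero => simp [pvPrev, pvEsc]
  | succ j => simp [pvPrev, pvEsc]

theorem fc_skip (cs : List Char) (p i : Nat) (h : i < cs.length)
    (hno : ¬(cs[i]? = some '}' ∧ pvEsc cs i = false ∧ p ≤ i)) :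
    pvFc cs (max p i) = pvFc cs (max p (i + 1)) := by
  by_cases hpi : p ≤ i
  · rw [show max p i = i from by omega, show max p (i + 1) = i + 1 from by omega]
    rw [pvFc, dif_pos h, if_neg (by tauto)]
  · rw [show max p i = p from by omega, show max p (i + 1) = p from by omega]

theorem b_scan (cs : List Char) (p : Nat) :
    ∀ i, i ≤ cs.length →
      pvBGo (p : Int) (cs.drop i) i (pvLo cs i) (pvPrev cs i) =
        (match pvFc cs (max p i) with
          | none => none
          | some e => some (pvLo cs e, (e : Int), decide (pvLo cs e ≠ -1))) := by
  intro i
  induction hd : cs.length - i using Nat.strong_induction_on generalizing i with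
  | _ d ih =>
  intro hi
  by_cases h : i < cs.length
  · have hdrop : cs.drop i = cs[i] :: cs.drop (i + 1) := List.drop_eq_getElem_cons h
    rw [hdrop, pvBGo]
    have hprev1 : pvPrev cs (i + 1) = some cs[i] := by
      simp [pvPrev, List.getElem?_eq_getElem h]
    by_cases hesc : pvEsc cs i = true
    · -- prev is a backslash: both brace branches are off
      have hpne : ¬ (pvPrev cs i ≠ some '\\') := by
        rw [pvPrev_esc]; simp [hesc]
      rw [if_neg (by tauto), if_neg (by tauto)]
      have hlo1 : pvLo cs (i + 1) = pvLo cs i := by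
        simp [pvLo, hesc]
      rw [← hlo1, ← hprev1, ih (cs.length - (i + 1)) (by omega) (i + 1) rfl (by omega)]
      rw [← fc_skip cs p i h (by simp [hesc])]
    · have hpe : pvPrev cs i ≠ some '\\' := (pvPrev_esc cs i).mpr (by simpa using hesc)
      by_cases hc : cs[i] = '{'
      · rw [if_pos ⟨hpe, hc⟩]
        have hlo1 : pvLo cs (i + 1) = (i : Int) := by
          simp [pvLo, List.getElem?_eq_getElem h, hc, hesc]
        rw [← hlo1, ← hprev1, ih (cs.length - (i + 1)) (by omega) (i + 1) rfl (by omega)]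
        rw [← fc_skip cs p i h (by simp [List.getElem?_eq_getElem h, hc])]
      · rw [if_neg (by tauto)]
        by_cases hcl : cs[i] = '}' ∧ (p : Int) ≤ (i : Int)
        · rw [if_pos ⟨hpe, hcl.1, hcl.2⟩]
          have hfc : pvFc cs (max p i) = some i := by
            rw [show max p i = i from by omega]
            rw [pvFc, dif_pos h, if_pos ⟨by simp [List.getElem?_eq_getElem h, hcl.1], by simpa using hesc⟩]
          rw [hfc]
        · rw [if_neg (by tauto)]
          have hlo1 : pvLo cs (i + 1) = pvLo cs i := by
            simp [pvLo, List.getElem?_eq_getElem h, hc]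
          rw [← hlo1, ← hprev1, ih (cs.length - (i + 1)) (by omega) (i + 1) rfl (by omega)]
          rw [← fc_skip cs p i h (by
            intro hbad
            apply hcl
            refine ⟨by simpa [List.getElem?_eq_getElem h] using hbad.1, ?_⟩
            exact_mod_cast Nat.cast_le.mpr hbad.2.2)]
  · have hdrop : cs.drop i = [] := List.drop_eq_nil_of_le (by omega)
    rw [hdrop, pvBGo]
    rw [pvFc, dif_neg (by omega)]

theorem b_canon (value : String) (start : Int) (end_ : Int) (h : end_ ≠ -1) :
    find_replace_part_py_alt value start end_ =
      pvCanon value.toList start (pvClamp end_ value.toList.length) := by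
  unfold find_replace_part_py_alt
  rw [if_neg h]
  have hvl : value.toList.length = value.length := String.length_toList
  have hpos : (if 0 ≤ end_ then end_ else max 0 (end_ + (value.length : Int)))
      = ((pvClamp end_ value.toList.length : Nat) : Int) := by
    unfold pvClamp
    rw [hvl]
    split_ifs <;> omega
  simp only
  rw [hpos]
  have hb := b_scan value.toList (pvClamp end_ value.toList.length) 0 (by omega)
  rw [List.drop_zero] at hb
  simp only [pvLo, pvPrev, Nat.max_zero] at hb
  rw [hb, pvCanon]
  rcases hfc : pvFc value.toList (pvClamp end_ value.toList.length) with _ | e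
  · rfl
  · rfl

-- ===== VERDICT (by name: the statement is the Claim_ definition above) =====
theorem find_replace_part_py_spec : Claim_equal_find_replace_part_py := by
  intro value start end_ _
  unfold Spec_find_replace_part_py
  by_cases h : end_ = -1
  · subst h
    simp [find_replace_part_py, find_replace_part_py_alt, pvAOuter]
  · rw [a_canon value start end_ h, b_canon value start end_ h]
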